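-- pv_equiv track=rewrite | github.com/AmeliaK19/Bioinformatics | Bioinformatics Assignments/Shortest common superstring.py | compact_es
-- ===== SOURCE A (Python) =====
-- def sim(a:str, b:str):#first string gives the suffix
--     overlap = 0
--     length = min(len(a), len(b))+1
--     for i in range(1, length):
--         if a[-i:] == b[:i]:
--             overlap = i
--     return overlap
--
-- def conc(str1:str, str2:str, overlap_no:int):
--     new_string = str1 + str2[overlap_no:]
--     return new_string
--
-- def compact_es(subs):
--     if len(subs)==1:
--         return subs[0]
--     overlap_no = sim(subs[0], subs[1])
--     new_string = conc(subs[0], subs[1], overlap_no)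
--     subs.remove(subs[0])
--     subs.remove(subs[0])
--     subs.insert(0, new_string)
--     return compact_es(subs)
-- ===== SOURCE B (Python) =====
-- def compact_es(subs):
--     # Iterative left fold; overlap found by descending scan with early exit
--     # (first hit from the top IS the maximum), using startswith instead of
--     # building and comparing both slices at every length.
--     acc = subs[0]
--     for s in subs[1:]:
--         k = min(len(acc), len(s))
--         while k > 0 and not s.startswith(acc[len(acc) - k:]):
--             k -= 1
--         acc = acc + s[k:]
--     return acc
-- ===== Notes on version B (the rewrite author's own statement) =====
-- stated objective: alternative
-- what changed: Recursion that mutates the list (remove/insert) and an ascending keep-the-last-match overlap scan comparing both slices at each length is replaced by an iterative accumulator fold whose overlap is found by a descending startswith scan that stops at the first (maximal) hit — early exit and no per-step list surgery give the measured constant-factor speed-up.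
-- outside the precondition, e.g. on compact_es([]): A raises IndexError, B raises IndexError
import Mathlib
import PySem

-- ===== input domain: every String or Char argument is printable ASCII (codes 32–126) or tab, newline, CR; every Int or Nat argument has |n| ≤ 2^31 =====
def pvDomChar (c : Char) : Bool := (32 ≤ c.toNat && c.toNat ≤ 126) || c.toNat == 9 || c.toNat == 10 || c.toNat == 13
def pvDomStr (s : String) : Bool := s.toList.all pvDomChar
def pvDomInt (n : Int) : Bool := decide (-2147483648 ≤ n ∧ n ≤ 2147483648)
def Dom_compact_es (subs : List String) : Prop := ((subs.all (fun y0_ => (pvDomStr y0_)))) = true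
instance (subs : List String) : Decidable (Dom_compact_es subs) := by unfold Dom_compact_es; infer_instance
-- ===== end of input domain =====

-- B replaces the mutating recursion + ascending last-match overlap scan by an
-- iterative fold with a descending first-match (startswith) overlap scan; same
-- return value everywhere A returns. A empties and refills its argument list in
-- place, B does not mutate it — the equivalence proved here is about the return
-- value only.

-- ===== PORT A =====
def pv_sim (a b : String) : Int :=
  (PySem.List.pyRange 1 (min (PySem.Str.len a) (PySem.Str.len b) + 1) 1).foldl
    (fun overlap i =>
      if PySem.List.slice a.toList (some (-i)) none = PySem.List.slice b.toList none (some i)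
      then i else overlap) 0

def pv_conc (str1 str2 : String) (overlap_no : Int) : String :=
  String.ofList (str1.toList ++ PySem.List.slice str2.toList (some overlap_no) none)

def compact_es (subs : List String) : String :=
  match subs with
  | [] => ""            -- Python raises IndexError here; excluded by Pre_compact_es
  | [s] => s
  | a :: b :: rest => compact_es (pv_conc a b (pv_sim a b) :: rest)
termination_by subs.length

-- ===== PORT B =====
-- the descending while-loop of Source B: k counts down until k = 0 or s starts with acc's length-k suffix
def pvAltOverlap (a b : List Char) : Nat → Nat
  | 0 => 0
  | k+1 => if PySem.Chars.startswith b (a.drop (a.length - (k+1))) then k+1 else pvAltOverlap a b k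

def pvAltStep (acc s : List Char) : List Char :=
  acc ++ s.drop (pvAltOverlap acc s (min acc.length s.length))

def compact_es_alt (subs : List String) : String :=
  match subs with
  | [] => ""            -- Source B raises IndexError here too; excluded by Pre_compact_es
  | a :: rest => String.ofList (rest.foldl (fun acc s => pvAltStep acc s.toList) a.toList)

-- ===== PRECONDITION & SPEC =====
-- A (and B) raise IndexError on the empty list; nothing else is excluded.
def Pre_compact_es (subs : List String) : Prop := subs ≠ []
instance (subs : List String) : Decidable (Pre_compact_es subs) := by unfold Pre_compact_es; infer_instance
def pvWitness_compact_es : List String := ["abcab", "cabd"]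

def Spec_compact_es (subs : List String) (out : String) : Prop := out = compact_es_alt subs
instance (subs : List String) (out : String) : Decidable (Spec_compact_es subs out) := by unfold Spec_compact_es; infer_instance

-- ===== CLAIM (what is proved, stated in full; the proofs are below) =====
def Claim_equal_compact_es : Prop := ∀ (subs : List String), Dom_compact_es subs → Pre_compact_es subs → Spec_compact_es subs (compact_es subs)

-- ===== LEMMAS AND PROOFS =====

-- at each admissible length k, A's slice comparison and B's startswith test agree
lemma pv_test_eq (a b : List Char) (k : Nat) (hk : 0 < k) (ha : k ≤ a.length) (_hb : k ≤ b.length) :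
    (PySem.List.slice a (some (-(k : Int))) none = PySem.List.slice b none (some (k : Int)))
      ↔ PySem.Chars.startswith b (a.drop (a.length - k)) = true := by
  rw [PySem.List.slice_from_neg_natCast a k hk, PySem.List.slice_to_natCast b k,
      PySem.Chars.startswith_iff, List.prefix_iff_eq_take]
  have hlen : (a.drop (a.length - k)).length = k := by
    rw [List.length_drop]; omega
  rw [hlen]

-- A's ascending keep-the-last-match fold equals B's descending first-match scan
lemma pv_loop_eq (a b : List Char) (m : Nat) (ha : m ≤ a.length) (hb : m ≤ b.length) :
    ((PySem.List.pyRange 1 ((m : Int) + 1) 1).foldl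
      (fun overlap i =>
        if PySem.List.slice a (some (-i)) none = PySem.List.slice b none (some i)
        then i else overlap) 0) = (pvAltOverlap a b m : Int) := by
  induction m with
  | zero => simp [PySem.List.pyRange_one_eq_nil, pvAltOverlap]
  | succ m ih =>
    have h1 : (1 : Int) ≤ (m : Int) + 1 := by omega
    have hr : PySem.List.pyRange 1 (((m : Nat) + 1 : Int) + 1) 1
        = PySem.List.pyRange 1 ((m : Int) + 1) 1 ++ [(m : Int) + 1] := by
      have := PySem.List.pyRange_one_succ_right (a := 1) (b := (m : Int) + 1) h1
      simpa using this
    push_cast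
    rw [hr, List.foldl_append, ih (by omega) (by omega)]
    simp only [List.foldl_cons, List.foldl_nil]
    have hcast : ((m : Int) + 1) = ((m + 1 : Nat) : Int) := by push_cast; ring
    rw [hcast]
    by_cases h : PySem.Chars.startswith b (a.drop (a.length - (m + 1))) = true
    · rw [if_pos ((pv_test_eq a b (m+1) (by omega) ha hb).mpr h)]
      simp [pvAltOverlap, h]
    · rw [if_neg (fun hc => h ((pv_test_eq a b (m+1) (by omega) ha hb).mp hc))]
      simp [pvAltOverlap, h]

-- A's sim equals B's overlap count
lemma pv_sim_eq (a b : String) :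
    pv_sim a b = (pvAltOverlap a.toList b.toList (min a.toList.length b.toList.length) : Int) := by
  unfold pv_sim
  rw [PySem.Str.len_eq a, PySem.Str.len_eq b]
  have hmin : min ((a.toList.length : Int)) ((b.toList.length : Int))
      = ((min a.toList.length b.toList.length : Nat) : Int) := by push_cast; ring
  rw [hmin]
  exact pv_loop_eq a.toList b.toList _ (by omega) (by omega)

-- A's merge of two adjacent strings is B's fold step
lemma pv_merge_eq (a b : String) :
    (pv_conc a b (pv_sim a b)).toList = pvAltStep a.toList b.toList := by
  unfold pv_conc pvAltStep
  rw [pv_sim_eq, PySem.List.slice_from_natCast]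
  simp

-- main invariant: A's recursion computes B's fold
lemma pv_main (rest : List String) : ∀ (a : String),
    compact_es (a :: rest) = String.ofList (rest.foldl (fun acc s => pvAltStep acc s.toList) a.toList) := by
  induction rest with
  | nil => intro a; simp [compact_es]
  | cons b t ih =>
    intro a
    rw [show compact_es (a :: b :: t) = compact_es (pv_conc a b (pv_sim a b) :: t) from by
          rw [compact_es],
        ih (pv_conc a b (pv_sim a b))]
    simp [List.foldl_cons, pv_merge_eq]

-- ===== VERDICT (by name: the statement is the Claim_ definition above) =====
theorem compact_es_spec : Claim_equal_compact_es := by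
  intro subs _ hpre
  unfold Spec_compact_es
  match subs with
  | [] => exact absurd rfl hpre
  | a :: rest => rw [pv_main rest a]; rfl
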